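-- pv_equiv track=rewrite | github.com/BrianCLong/summit | summit/graph/builders/coshare.py | build_actor_similarity
-- ===== SOURCE A (Python) =====
-- import itertools
-- from collections import defaultdict
-- from typing import DefaultDict, Dict, Iterable, Set, Tuple
--
-- Event = tuple[str, str, int]
--
-- def build_actor_similarity(
--     events: Iterable[Event],
--     min_shared: int = 2,
-- ) -> dict[tuple[str, str], int]:
--     by_object: defaultdict[str, set[str]] = defaultdict(set)
--     for actor, obj, _ts in events:
--         by_object[obj].add(actor)
--
--     pair_counts: defaultdict[tuple[str, str], int] = defaultdict(int)
--     for actors in by_object.values():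
--         # Optimization: Use itertools.combinations instead of nested loops
--         # to generate pairs more efficiently (C implementation).
--         for pair in itertools.combinations(sorted(actors), 2):
--             pair_counts[pair] += 1
--
--     return {pair: count for pair, count in pair_counts.items() if count >= min_shared}
-- ===== SOURCE B (Python) =====
-- def build_actor_similarity(events, min_shared=2):
--     # Group actors by object, then for each candidate pair (found in first-
--     # co-occurrence order) count directly how many object groups contain both
--     # actors; no incremental pair counter and no final filtering pass needed.
--     by_object = {}
--     for actor, obj, _ts in events:
--         by_object.setdefault(obj, set()).add(actor)
--     groups = list(by_object.values())
--     result = {}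
--     for actors in groups:
--         sa = sorted(actors)
--         for i, a in enumerate(sa):
--             for b in sa[i + 1:]:
--                 if (a, b) not in result:
--                     c = sum(1 for members in groups if a in members and b in members)
--                     if c >= min_shared:
--                         result[(a, b)] = c
--     return result
-- ===== Notes on version B (the rewrite author's own statement) =====
-- stated objective: alternative
-- what changed: A accumulates an incremental pair counter over every per-object combination and then filters by the threshold in a second dict pass; B instead, at the first occurrence of each candidate pair, directly counts the object groups containing both actors and inserts it only if that count meets the threshold, so the pair-counter dict and the final filtering pass disappear.
import Mathlib
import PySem

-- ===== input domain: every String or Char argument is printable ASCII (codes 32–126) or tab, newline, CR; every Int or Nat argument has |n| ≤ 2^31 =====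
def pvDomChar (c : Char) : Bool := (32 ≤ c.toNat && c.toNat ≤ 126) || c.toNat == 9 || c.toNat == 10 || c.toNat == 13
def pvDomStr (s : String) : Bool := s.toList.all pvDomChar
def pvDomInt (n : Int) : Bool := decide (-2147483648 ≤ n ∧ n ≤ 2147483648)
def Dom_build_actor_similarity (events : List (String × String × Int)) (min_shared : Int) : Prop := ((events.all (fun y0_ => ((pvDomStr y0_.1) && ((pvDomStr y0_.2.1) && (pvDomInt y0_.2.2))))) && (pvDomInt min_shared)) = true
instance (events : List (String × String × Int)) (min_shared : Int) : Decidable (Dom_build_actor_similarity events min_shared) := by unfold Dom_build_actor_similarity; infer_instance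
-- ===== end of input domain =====

-- B replaces A's incremental pair counter + final threshold filter by a direct count, per
-- first-seen pair, of the object groups containing both actors (objective: alternative).

-- ===== PORT A =====
-- tuple view of a 2-element combination produced by itertools.combinations(…, 2)
def pvPairOf (l : List String) : String × String := (l.headD "", (l.drop 1).headD "")

def build_actor_similarity (events : List (String × String × Int)) (min_shared : Int) : List (String × String × Int) :=
  -- by_object[obj].add(actor)  (defaultdict(set): modify = d[k] = f(d.get(k, set())))
  let by_object : PySem.Dict String (PySem.Set String) :=
    events.foldl (fun d e => d.modify e.2.1 PySem.Set.empty (fun s => PySem.Set.add s e.1)) PySem.Dict.empty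
  -- pair_counts[pair] += 1 over combinations(sorted(actors), 2)
  let pair_counts : PySem.Dict (String × String) Int :=
    by_object.values.foldl (fun pc actors =>
      ((PySem.List.combinations (PySem.List.sorted actors (fun x => x) false) 2).map pvPairOf).foldl
        (fun pc pair => pc.modify pair 0 (· + 1)) pc) PySem.Dict.empty
  -- {pair: count for pair, count in pair_counts.items() if count >= min_shared}
  (pair_counts.items.filter (fun p => decide (min_shared ≤ p.2))).map (fun p => (p.1.1, p.1.2, p.2))

-- ===== PORT B =====
def build_actor_similarity_alt (events : List (String × String × Int)) (min_shared : Int) : List (String × String × Int) :=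
  -- by_object.setdefault(obj, set()).add(actor)  (in-place add = d[k] = f(d.get(k, set())))
  let by_object : PySem.Dict String (PySem.Set String) :=
    events.foldl (fun d e => d.modify e.2.1 PySem.Set.empty (fun s => PySem.Set.add s e.1)) PySem.Dict.empty
  let groups : List (PySem.Set String) := by_object.values
  let result : PySem.Dict (String × String) Int :=
    groups.foldl (fun r actors =>
      let sa := PySem.List.sorted actors (fun x => x) false
      -- for i, a in enumerate(sa): for b in sa[i+1:]:
      (PySem.List.enumerate sa).foldl (fun r ia =>
        (PySem.List.slice sa (some (ia.1 + 1)) none).foldl (fun r b =>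
          let pair := (ia.2, b)
          if r.contains pair then r
          else
            -- c = sum(1 for members in groups if a in members and b in members)
            let c : Int := (groups.countP (fun members =>
              PySem.Set.contains members pair.1 && PySem.Set.contains members pair.2) : Nat)
            if min_shared ≤ c then r.insert pair c else r) r) r) PySem.Dict.empty
  result.items.map (fun p => (p.1.1, p.1.2, p.2))

-- ===== PRECONDITION & SPEC =====
def Spec_build_actor_similarity (events : List (String × String × Int)) (min_shared : Int) (out : List (String × String × Int)) : Prop := out = build_actor_similarity_alt events min_shared
instance (events : List (String × String × Int)) (min_shared : Int) (out : List (String × String × Int)) : Decidable (Spec_build_actor_similarity events min_shared out) := by unfold Spec_build_actor_similarity; infer_instance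

-- ===== CLAIM (what is proved, stated in full; the proofs are below) =====
def Claim_equal_build_actor_similarity : Prop := ∀ (events : List (String × String × Int)) (min_shared : Int), Dom_build_actor_similarity events min_shared → Spec_build_actor_similarity events min_shared (build_actor_similarity events min_shared)

-- ===== LEMMAS AND PROOFS =====

def pvPairs : List String → List (String × String)
  | [] => []
  | x :: t => t.map (fun y => (x, y)) ++ pvPairs t

-- combinations(sorted,2) as tuples = pvPairs
theorem pv_comb_eq (l : List String) :
    (PySem.List.combinations l 2).map pvPairOf = pvPairs l := by
  induction l with
  | nil => rfl
  | cons x t ih =>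
    rw [PySem.List.combinations_cons_succ, PySem.List.combinations_one]
    simp only [List.map_append, List.map_map, pvPairs]
    rw [ih]
    simp [Function.comp_def, pvPairOf]

-- enumerate/slice nested fold = fold over pvPairs
theorem pv_enum_fold {γ : Type} (g : γ → String × String → γ) (sa0 : List String) :
    ∀ (suf : List String) (k : Nat) (r : γ), sa0.drop k = suf →
      (PySem.List.enumerate suf (k : Int)).foldl (fun r ia =>
        (PySem.List.slice sa0 (some (ia.1 + 1)) none).foldl (fun r b => g r (ia.2, b)) r) r
      = (pvPairs suf).foldl g r := by
  intro suf
  induction suf with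
  | nil => intro k r h; simp [PySem.List.enumerate, pvPairs]
  | cons x t ih =>
    intro k r h
    have hdrop : sa0.drop (k + 1) = t := by
      rw [← List.drop_drop] at *
      · rw [h]; rfl
    have hk1 : (k : Int) + 1 = ((k + 1 : Nat) : Int) := by push_cast; ring
    simp only [PySem.List.enumerate, List.foldl_cons, pvPairs, List.foldl_append]
    rw [hk1, PySem.List.slice_from_natCast, hdrop, ← ih (k + 1) _ hdrop]
    congr 1
    rw [List.foldl_map]

-- membership facts for pvPairs
theorem pv_mem_pairs {a b : String} : ∀ {l : List String}, (a, b) ∈ pvPairs l →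
    a ∈ l ∧ b ∈ l ∧ (l.Pairwise (· < ·) → a < b) := by
  intro l
  induction l with
  | nil => intro h; simp [pvPairs] at h
  | cons x t ih =>
    intro h
    simp only [pvPairs, List.mem_append, List.mem_map] at h
    rcases h with ⟨y, hy, he⟩ | h
    · obtain ⟨rfl, rfl⟩ : x = a ∧ y = b := by
        constructor <;> simp_all [Prod.ext_iff]
      exact ⟨List.mem_cons_self, List.mem_cons_of_mem _ hy,
        fun hp => (List.pairwise_cons.mp hp).1 _ hy⟩
    · obtain ⟨h1, h2, h3⟩ := ih h
      exact ⟨List.mem_cons_of_mem _ h1, List.mem_cons_of_mem _ h2,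
        fun hp => h3 (List.pairwise_cons.mp hp).2⟩

-- count of a pair in pvPairs over a strictly sorted list
theorem pv_count_pairs {a b : String} (hab : a < b) :
    ∀ {l : List String}, l.Pairwise (· < ·) →
      (pvPairs l).count (a, b) = if a ∈ l ∧ b ∈ l then 1 else 0 := by
  intro l
  induction l with
  | nil => intro _; simp [pvPairs]
  | cons x t ih =>
    intro hp
    obtain ⟨hx, ht⟩ := List.pairwise_cons.mp hp
    have hnd : t.Nodup := ht.imp (fun h => ne_of_lt h)
    have hmap : (t.map (fun y => (x, y))).count (a, b) = if x = a then t.count b else 0 := by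
      by_cases hxa : x = a
      · subst hxa
        simp only [List.count, List.countP_map]
        apply List.countP_congr
        intro y _
        simp [Prod.ext_iff]
      · simp only [List.count, List.countP_map, if_neg hxa]
        rw [List.countP_eq_zero]
        intro y _
        simp [Prod.ext_iff, hxa]
    simp only [pvPairs, List.count_append, hmap, ih ht]
    by_cases hxa : x = a
    · subst hxa
      have hxt : x ∉ t := fun hmem => lt_irrefl x (hx x hmem)
      have h1 : ¬ (x ∈ t ∧ b ∈ t) := fun ⟨h, _⟩ => hxt h
      have hbx : b ≠ x := ne_of_gt hab
      by_cases hbt : b ∈ t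
      · simp [hbt, hbx, hxt, List.count_eq_one_of_mem hnd hbt]
      · simp [hbt, hbx, List.count_eq_zero_of_not_mem hbt]
    · by_cases hat : a ∈ t
      · have hbx : b ≠ x := fun he => absurd (he ▸ hx a hat) (by exact fun h => absurd (hab.trans h) (lt_irrefl a))
        by_cases hbt : b ∈ t <;> simp [hxa, hat, hbt, hbx, Ne.symm hxa]
      · simp only [if_neg hxa]
        have : a ≠ x := fun h => hxa h.symm
        simp [hat, this]

-- first-occurrence insert loop: resulting items
theorem pv_dedup_items (c : String × String → Int) (m : Int) :
    ∀ (l : List (String × String)) (d : PySem.Dict (String × String) Int),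
      (l.foldl (fun r p => if r.contains p then r
        else if m ≤ c p then r.insert p (c p) else r) d).items
      = d.items ++ ((PySem.Set.ofList l).filter
          (fun p => !d.contains p && decide (m ≤ c p))).map (fun p => (p, c p)) := by
  intro l
  induction l with
  | nil => intro d; simp [PySem.Set.ofList]
  | cons p t ih =>
    intro d
    have hdis : ∀ (pred : String × String → Bool), pred p = false →
        ((PySem.Set.ofList t).discard p).filter pred = (PySem.Set.ofList t).filter pred := by
      intro pred hpred
      simp only [PySem.Set.discard, List.filter_filter]
      apply List.filter_congr
      intro y _
      by_cases hyp : y = p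
      · simp [hyp, hpred]
      · simp [hyp]
    rw [PySem.Set.ofList_cons]
    by_cases hd : d.contains p = true
    · have hpredp : (!d.contains p && decide (m ≤ c p)) = false := by simp [hd]
      simp only [List.foldl_cons, if_pos hd, ih d, List.filter_cons]
      rw [if_neg (by simp [hd]), hdis _ hpredp]
    · have hd' : d.contains p = false := by simpa using hd
      by_cases hm : m ≤ c p
      · simp only [List.foldl_cons, if_neg hd, if_pos hm, ih (d.insert p (c p))]
        rw [PySem.Dict.items_insert_of_not_contains d _ hd']
        have hins : ∀ y, (!(d.insert p (c p)).contains y && decide (m ≤ c y))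
            = ((!(y == p)) && (!d.contains y && decide (m ≤ c y))) := by
          intro y
          rw [PySem.Dict.contains_insert]
          by_cases hyp : y = p <;> simp [hyp, Bool.and_assoc]
        rw [List.filter_congr (fun y _ => hins y)]
        simp only [List.filter_cons]
        rw [if_pos (by simp [hd', hm])]
        simp only [List.map_cons, List.append_assoc, List.singleton_append]
        congr 2
        simp only [PySem.Set.discard, List.filter_filter]
        congr 1
        apply List.filter_congr
        intro y _
        rw [Bool.and_comm]
      · have hpredp : (!d.contains p && decide (m ≤ c p)) = false := by simp [hm]
        simp only [List.foldl_cons, if_neg hd, if_neg hm, ih d, List.filter_cons]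
        rw [if_neg (by simp [hm]), hdis _ hpredp]

-- every value of the by_object dict is a Nodup list (a genuine set)
theorem pv_values_nodup :
    ∀ (events : List (String × String × Int)) (d : PySem.Dict String (PySem.Set String)),
      (∀ S ∈ d.values, S.Nodup) →
      ∀ S ∈ (events.foldl (fun d e =>
        d.modify e.2.1 PySem.Set.empty (fun s => PySem.Set.add s e.1)) d).values, S.Nodup := by
  intro events
  induction events with
  | nil => intro d h; simpa using h
  | cons e t ih =>
    intro d h
    simp only [List.foldl_cons]
    apply ih
    intro S hS
    have := PySem.Dict.mem_values_insert (d := d) (k := e.2.1)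
      (v := PySem.Set.add (d.getD e.2.1 PySem.Set.empty) e.1) (w := S)
    rcases this hS with rfl | hmem
    · apply PySem.Set.nodup_add
      cases hg : d.get? e.2.1 with
      | none => simp [PySem.Dict.getD_eq_get?_getD, hg, PySem.Set.empty]
      | some v =>
        rw [PySem.Dict.getD_eq_get?_getD, hg]
        exact h v (by
          have := PySem.Dict.mem_items_of_get?_eq_some (d := d) hg
          simp only [PySem.Dict.values]
          exact List.mem_map.mpr ⟨(e.2.1, v), this, rfl⟩)
    · exact h S hmem

-- strictly sorted
theorem pv_sorted_strict (S : List String) (h : S.Nodup) :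
    (PySem.List.sorted S (fun x => x) false).Pairwise (· < ·) := by
  have h1 := PySem.List.sorted_pairwise S (fun x => x)
  have h2 : (PySem.List.sorted S (fun x => x) false).Nodup :=
    (PySem.List.sorted_perm S (fun x => x) false).nodup_iff.mpr h
  exact (h1.and h2).imp (fun ⟨hle, hne⟩ => lt_of_le_of_ne hle hne)

-- the central counting identity
theorem pv_count_eq (vals : List (PySem.Set String))
    (hval : ∀ S ∈ vals, S.Nodup) (p : String × String)
    (hp : p ∈ vals.flatMap (fun S => pvPairs (PySem.List.sorted S (fun x => x) false))) :
    (vals.flatMap (fun S => pvPairs (PySem.List.sorted S (fun x => x) false))).count p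
      = vals.countP (fun S => PySem.Set.contains S p.1 && PySem.Set.contains S p.2) := by
  obtain ⟨a, b⟩ := p
  obtain ⟨S₀, hS₀, hmem⟩ := List.mem_flatMap.mp hp
  have hab : a < b :=
    (pv_mem_pairs hmem).2.2 (pv_sorted_strict S₀ (hval S₀ hS₀))
  rw [List.count_flatMap,
    ← PySem.List.sum_map_ite_one_zero_nat
      (fun S => PySem.Set.contains S (a, b).1 && PySem.Set.contains S (a, b).2) vals]
  congr 1
  apply List.map_congr_left
  intro S hS
  simp only [Function.comp_apply]
  rw [pv_count_pairs hab (pv_sorted_strict S (hval S hS))]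
  have hma : a ∈ PySem.List.sorted S (fun x => x) false ↔ a ∈ S :=
    (PySem.List.sorted_perm S (fun x => x) false).mem_iff
  have hmb : b ∈ PySem.List.sorted S (fun x => x) false ↔ b ∈ S :=
    (PySem.List.sorted_perm S (fun x => x) false).mem_iff
  have ca := PySem.Set.contains_iff (s := S) (x := a)
  have cb := PySem.Set.contains_iff (s := S) (x := b)
  by_cases ha : a ∈ S <;> by_cases hb : b ∈ S <;>
    simp [hma, hmb, ha, hb]

theorem pv_enum_fold0 {γ : Type} (g : γ → String × String → γ) (sa : List String) (r : γ) :
    (PySem.List.enumerate sa 0).foldl (fun r ia =>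
      (PySem.List.slice sa (some (ia.1 + 1)) none).foldl (fun r b => g r (ia.2, b)) r) r
    = (pvPairs sa).foldl g r := by
  have h := pv_enum_fold g sa sa 0 r rfl
  simpa using h

-- ===== VERDICT (by name: the statement is the Claim_ definition above) =====
theorem build_actor_similarity_spec : Claim_equal_build_actor_similarity := by
  unfold Claim_equal_build_actor_similarity
  intro events m _
  unfold Spec_build_actor_similarity
  simp only [build_actor_similarity, build_actor_similarity_alt]
  set d := events.foldl (fun d e => d.modify e.2.1 PySem.Set.empty (fun s => PySem.Set.add s e.1))
    PySem.Dict.empty with hd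
  set stream := d.values.flatMap (fun S => pvPairs (PySem.List.sorted S (fun x => x) false)) with hs
  set cfun : String × String → Int := fun p =>
    ((d.values.countP (fun S => PySem.Set.contains S p.1 && PySem.Set.contains S p.2) : Nat) : Int)
    with hcf
  have hval : ∀ S ∈ d.values, S.Nodup := by
    apply pv_values_nodup
    intro S hS
    simp [PySem.Dict.values, PySem.Dict.empty] at hS
  have hA : (d.values.foldl (fun pc actors =>
      ((PySem.List.combinations (PySem.List.sorted actors (fun x => x) false) 2).map pvPairOf).foldl
        (fun pc pair => pc.modify pair 0 (· + 1)) pc) PySem.Dict.empty)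
      = PySem.Dict.counter stream := by
    rw [hs, PySem.Dict.counter_eq_foldl, List.foldl_flatMap]
    apply PySem.List.foldl_congr_mem
    intro pc S _
    rw [pv_comb_eq]
  have hB : (d.values.foldl (fun r actors =>
      let sa := PySem.List.sorted actors (fun x => x) false
      (PySem.List.enumerate sa).foldl (fun r ia =>
        (PySem.List.slice sa (some (ia.1 + 1)) none).foldl (fun r b =>
          let pair := (ia.2, b)
          if r.contains pair then r
          else
            let c : Int := (d.values.countP (fun members =>
              PySem.Set.contains members pair.1 && PySem.Set.contains members pair.2) : Nat)
            if m ≤ c then r.insert pair c else r) r) r) PySem.Dict.empty)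
      = stream.foldl (fun r q => if r.contains q then r
          else if m ≤ cfun q then r.insert q (cfun q) else r) PySem.Dict.empty := by
    rw [hs, List.foldl_flatMap]
    apply PySem.List.foldl_congr_mem
    intro r S _
    exact pv_enum_fold0 (fun r q => if r.contains q then r
      else if m ≤ cfun q then r.insert q (cfun q) else r) _ r
  have hemp : (PySem.Dict.empty : PySem.Dict (String × String) Int).items = [] := rfl
  rw [hA, hB, PySem.Dict.items_counter,
    pv_dedup_items cfun m stream PySem.Dict.empty, hemp,
    List.filter_map, List.map_map, List.nil_append, List.map_map]
  simp only [PySem.Dict.contains_empty, Bool.not_false, Bool.true_and]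
  have hkey : ∀ k ∈ PySem.Set.ofList stream, ((stream.count k : Nat) : Int) = cfun k := by
    intro k hk
    have hks : k ∈ stream := by rw [PySem.Set.mem_ofList] at hk; exact hk
    have h := pv_count_eq d.values hval k hks
    simp only [hcf]
    exact_mod_cast h
  have hfil : (PySem.Set.ofList stream).filter
        ((fun p => decide (m ≤ p.2)) ∘ (fun k => (k, (stream.count k : Int))))
      = (PySem.Set.ofList stream).filter (fun p => decide (m ≤ cfun p)) := by
    apply List.filter_congr
    intro k hk
    simp only [Function.comp_apply]
    rw [hkey k hk]
  rw [hfil]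
  apply List.map_congr_left
  intro k hk
  have hks : k ∈ PySem.Set.ofList stream := List.mem_of_mem_filter hk
  simp only [Function.comp_apply]
  rw [hkey k hks]
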